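-- pv_equiv track=rewrite | github.com/ubububububub/one-day-one-algorithm | Kim Ubeom/0019.py | diffDigit
-- ===== SOURCE A (Python) =====
-- def diffDigit(a, b):
--     a = str(a)
--     b = str(b)
--     answer = 0
--     aLen = len(a)
--     bLen = len(b)
--
--     if aLen == bLen:
--         for i in range(aLen):
--             if a[i] != b[i]:
--                 answer = answer + 1
--         return answer
--     else:
--         maxNum = max(aLen, bLen)
--
--         if aLen == maxNum:
--             gap = aLen - bLen
--
--             for i in range(gap):
--                 b = '*' + b
--         else:
--             gap = bLen - aLen
--
--             for i in range(gap):
--                 a = '*' + a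
--
--     for i in range(len(a)):
--         if a[i] != b[i]:
--             answer = answer + 1
--
--     return answer
-- ===== SOURCE B (Python) =====
-- def diffDigit(a, b):
--     # Pure integer arithmetic: never builds strings.  Each number becomes a list of
--     # tokens right-aligned, least-significant first: its decimal digits (of |n|)
--     # followed by -1 for a leading '-' sign.  A missing token (shorter number)
--     # can never equal a present one, so comparing token lists position by position
--     # reproduces the right-aligned character comparison exactly.
--     def tokens(n):
--         m = abs(n)
--         t = []
--         while True:
--             t.append(m % 10)
--             m //= 10
--             if m == 0:
--                 break
--         if n < 0:
--             t.append(-1)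
--         return t
--
--     ta, tb = tokens(a), tokens(b)
--     answer = 0
--     for i in range(max(len(ta), len(tb))):
--         x = ta[i] if i < len(ta) else None
--         y = tb[i] if i < len(tb) else None
--         if x != y:
--             answer += 1
--     return answer
-- ===== Notes on version B (the rewrite author's own statement) =====
-- stated objective: alternative
-- what changed: B never builds the decimal strings or A's '*'-padding: it extracts digit tokens of |n| by repeated divmod 10 (least significant first, with -1 as a sign token) and counts positions where the two token lists disagree, a missing token standing in for a missing character.
import Mathlib
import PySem

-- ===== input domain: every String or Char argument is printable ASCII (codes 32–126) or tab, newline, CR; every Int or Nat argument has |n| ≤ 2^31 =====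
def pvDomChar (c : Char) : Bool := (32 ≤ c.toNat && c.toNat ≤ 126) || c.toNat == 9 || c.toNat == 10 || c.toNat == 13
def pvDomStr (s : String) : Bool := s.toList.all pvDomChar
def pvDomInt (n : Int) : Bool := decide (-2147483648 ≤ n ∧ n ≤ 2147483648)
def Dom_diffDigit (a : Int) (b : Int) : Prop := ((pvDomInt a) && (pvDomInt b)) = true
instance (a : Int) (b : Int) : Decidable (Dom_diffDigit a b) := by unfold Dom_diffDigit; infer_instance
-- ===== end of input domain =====

-- B works in pure integer arithmetic (divmod digit tokens, sign as token -1) and never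
-- builds the decimal strings or A's '*'-padding; objective: alternative decomposition.

-- ===== PORT A =====

-- the padding loop 'for i in range(gap): s = '*' + s'
def padStar : Nat → List Char → List Char
  | 0, l => l
  | n + 1, l => padStar n ('*' :: l)

-- the counting loop 'for i in range(len(a)): if a[i] != b[i]: answer += 1'
-- (run on two equal-length strings in A, so position-by-position recursion)
def mismatch : List Char → List Char → Int
  | x :: xs, y :: ys => (if x ≠ y then 1 else 0) + mismatch xs ys
  | _, _ => 0

def diffDigit (a : Int) (b : Int) : Int :=
  let sa := PySem.Int.toChars a
  let sb := PySem.Int.toChars b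
  let aLen := sa.length
  let bLen := sb.length
  if aLen = bLen then
    mismatch sa sb
  else
    let maxNum := max aLen bLen
    if aLen = maxNum then
      mismatch sa (padStar (aLen - bLen) sb)
    else
      mismatch (padStar (bLen - aLen) sa) sb

-- ===== PORT B =====

-- Source B's inner do-while 'while True: t.append(m % 10); m //= 10; if m == 0: break';
-- m = abs(n) is a Nat here, where Lean's / and % agree exactly with Python's // and %
def natTokens (m : Nat) : List Int :=
  ((m % 10 : Nat) : Int) :: (if m / 10 = 0 then [] else natTokens (m / 10))
termination_by m
decreasing_by exact Nat.div_lt_self (by omega) (by omega)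

-- Source B's 'tokens(n)': decimal digit tokens of |n|, least significant first, then -1 for '-'
def tokens (n : Int) : List Int :=
  natTokens n.natAbs ++ (if n < 0 then [-1] else [])

-- Source B's main loop over range(max(len(ta), len(tb))) with optional lookups (None ↦ none)
def diffDigit_alt (a : Int) (b : Int) : Int :=
  let ta := tokens a
  let tb := tokens b
  (List.range (max ta.length tb.length)).foldl
    (fun answer i => if ta[i]? ≠ tb[i]? then answer + 1 else answer) 0

-- ===== PRECONDITION & SPEC =====
def Spec_diffDigit (a : Int) (b : Int) (out : Int) : Prop := out = diffDigit_alt a b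
instance (a : Int) (b : Int) (out : Int) : Decidable (Spec_diffDigit a b out) := by unfold Spec_diffDigit; infer_instance

-- ===== CLAIM (what is proved, stated in full; the proofs are below) =====
def Claim_equal_diffDigit : Prop := ∀ (a : Int) (b : Int), Dom_diffDigit a b → Spec_diffDigit a b (diffDigit a b)

-- ===== LEMMAS AND PROOFS =====

-- zipped mismatch count of the right-aligned overlap (proof-only bridge quantity)
def zc (xs ys : List Char) : Int :=
  ((xs.zip ys).map (fun p => if p.1 ≠ p.2 then (1 : Int) else 0)).sum

/- ---------- A-side: diffDigit = zc of the reverses + |length difference| ---------- -/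

lemma toDigitsCore_no_star (f n : Nat) (acc : List Char) (h : ∀ c ∈ acc, c ≠ '*') :
    ∀ c ∈ Nat.toDigitsCore 10 f n acc, c ≠ '*' := by
  induction f generalizing n acc with
  | zero => simpa [Nat.toDigitsCore] using h
  | succ f ih =>
    intro c hc
    have hd : Nat.digitChar (n % 10) ≠ '*' := by
      have h10 : n % 10 < 10 := Nat.mod_lt _ (by omega)
      interval_cases h' : (n % 10) <;> decide
    have hacc : ∀ c ∈ Nat.digitChar (n % 10) :: acc, c ≠ '*' := by
      intro c hc
      rcases List.mem_cons.mp hc with rfl | hc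
      · exact hd
      · exact h c hc
    simp only [Nat.toDigitsCore] at hc
    split at hc
    · exact hacc c hc
    · exact ih (n / 10) _ hacc c hc

lemma toChars_no_star (n : Int) : ∀ c ∈ PySem.Int.toChars n, c ≠ '*' := by
  intro c hc
  unfold PySem.Int.toChars at hc
  split at hc
  · rcases List.mem_cons.mp hc with rfl | hc
    · decide
    · exact toDigitsCore_no_star _ _ [] (by simp) c hc
  · exact toDigitsCore_no_star _ _ [] (by simp) c hc

lemma padStar_eq_replicate (n : Nat) (l : List Char) :
    padStar n l = List.replicate n '*' ++ l := by
  induction n generalizing l with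
  | zero => simp [padStar]
  | succ k ih => simp [padStar, ih, List.replicate_succ']

lemma mismatch_eq_zc (xs ys : List Char) (h : xs.length = ys.length) :
    mismatch xs ys = zc xs ys := by
  induction xs generalizing ys with
  | nil => cases ys <;> simp_all [mismatch, zc]
  | cons x xs ih =>
    cases ys with
    | nil => simp at h
    | cons y ys => simp_all [mismatch, zc]

lemma mismatch_append (x1 x2 y1 y2 : List Char) (h : x1.length = y1.length) :
    mismatch (x1 ++ x2) (y1 ++ y2) = mismatch x1 y1 + mismatch x2 y2 := by
  induction x1 generalizing y1 with
  | nil => cases y1 <;> simp_all [mismatch]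
  | cons x xs ih =>
    cases y1 with
    | nil => simp at h
    | cons y ys =>
      simp only [List.cons_append, mismatch, List.length_cons] at *
      rw [ih ys (by omega)]; ring

lemma mismatch_star_left (s : List Char) (h : ∀ c ∈ s, c ≠ '*') :
    mismatch (List.replicate s.length '*') s = s.length := by
  induction s with
  | nil => simp [mismatch]
  | cons x xs ih =>
    have hx : x ≠ '*' := h x (by simp)
    simp only [List.length_cons, List.replicate_succ, mismatch]
    rw [ih (fun c hc => h c (by simp [hc]))]
    simp [Ne.symm hx]; ring

lemma mismatch_star_right (s : List Char) (h : ∀ c ∈ s, c ≠ '*') :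
    mismatch s (List.replicate s.length '*') = s.length := by
  induction s with
  | nil => simp [mismatch]
  | cons x xs ih =>
    have hx : x ≠ '*' := h x (by simp)
    simp only [List.length_cons, List.replicate_succ, mismatch]
    rw [ih (fun c hc => h c (by simp [hc]))]
    simp [hx]; ring

lemma zip_reverse_eq (xs ys : List Char) (h : xs.length = ys.length) :
    xs.reverse.zip ys.reverse = (xs.zip ys).reverse := by
  induction xs generalizing ys with
  | nil => cases ys <;> simp_all
  | cons x xs ih =>
    cases ys with
    | nil => simp at h
    | cons y ys =>
      simp only [List.length_cons, Nat.succ.injEq] at h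
      simp only [List.reverse_cons, List.zip_cons_cons]
      rw [List.zip_append (by simp [h]), ih ys h]
      simp

lemma zc_reverse (xs ys : List Char) (h : xs.length = ys.length) :
    zc xs.reverse ys.reverse = zc xs ys := by
  unfold zc
  rw [zip_reverse_eq xs ys h, List.map_reverse, List.sum_reverse]

-- the right-aligned overlap only: xs split as pre ++ suf with |suf| = |ys|
lemma zc_reverse_drop (pre suf ys : List Char) (h : suf.length = ys.length) :
    zc (pre ++ suf).reverse ys.reverse = zc suf ys := by
  unfold zc
  rw [List.reverse_append]
  rw [show ys.reverse = ys.reverse ++ ([] : List Char) by simp]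
  rw [List.zip_append (by simp [h])]
  simp only [List.zip_nil_right, List.append_nil]
  rw [zip_reverse_eq suf ys h, List.map_reverse, List.sum_reverse]

lemma zc_reverse_drop' (xs pre suf : List Char) (h : xs.length = suf.length) :
    zc xs.reverse (pre ++ suf).reverse = zc xs suf := by
  unfold zc
  rw [List.reverse_append]
  rw [show xs.reverse = xs.reverse ++ ([] : List Char) by simp]
  rw [List.zip_append (by simp [h])]
  simp only [List.zip_nil_left, List.append_nil]
  rw [zip_reverse_eq xs suf h, List.map_reverse, List.sum_reverse]

lemma main_left (s t : List Char) (hs : ∀ c ∈ s, c ≠ '*') (hlt : t.length < s.length) :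
    mismatch s (padStar (s.length - t.length) t)
      = zc s.reverse t.reverse + ((s.length : Int) - (t.length : Int)) := by
  set g := s.length - t.length with hg
  have hsplit : s = s.take g ++ s.drop g := (List.take_append_drop g s).symm
  have htk : (s.take g).length = g := by simp [List.length_take]; omega
  have hdr : (s.drop g).length = t.length := by simp [List.length_drop]; omega
  rw [padStar_eq_replicate]
  have hstep : mismatch s (List.replicate g '*' ++ t)
      = mismatch (s.take g) (List.replicate g '*') + mismatch (s.drop g) t := by
    conv_lhs => rw [hsplit]
    exact mismatch_append _ _ _ _ (by simp [htk])
  rw [hstep]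
  have hstar : mismatch (s.take g) (List.replicate g '*') = (g : Int) := by
    have := mismatch_star_right (s.take g) (fun c hc => hs c (List.mem_of_mem_take hc))
    rw [htk] at this; exact this
  rw [hstar, mismatch_eq_zc _ _ hdr]
  have hrev : zc s.reverse t.reverse = zc (s.drop g) t := by
    conv_lhs => rw [hsplit]
    exact zc_reverse_drop _ _ _ hdr
  rw [hrev]
  have : (g : Int) = (s.length : Int) - (t.length : Int) := by omega
  rw [this]; ring

lemma main_right (s t : List Char) (ht : ∀ c ∈ t, c ≠ '*') (hlt : s.length < t.length) :
    mismatch (padStar (t.length - s.length) s) t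
      = zc s.reverse t.reverse + ((t.length : Int) - (s.length : Int)) := by
  set g := t.length - s.length with hg
  have hsplit : t = t.take g ++ t.drop g := (List.take_append_drop g t).symm
  have htk : (t.take g).length = g := by simp [List.length_take]; omega
  have hdr : (t.drop g).length = s.length := by simp [List.length_drop]; omega
  rw [padStar_eq_replicate]
  have hstep : mismatch (List.replicate g '*' ++ s) t
      = mismatch (List.replicate g '*') (t.take g) + mismatch s (t.drop g) := by
    conv_lhs => rw [hsplit]
    exact mismatch_append _ _ _ _ (by simp [htk])
  rw [hstep]
  have hstar : mismatch (List.replicate g '*') (t.take g) = (g : Int) := by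
    have := mismatch_star_left (t.take g) (fun c hc => ht c (List.mem_of_mem_take hc))
    rw [htk] at this; exact this
  rw [hstar, mismatch_eq_zc _ _ (by omega)]
  have hrev : zc s.reverse t.reverse = zc s (t.drop g) := by
    conv_lhs => rw [hsplit]
    exact zc_reverse_drop' _ _ _ (by omega)
  rw [hrev]
  have : (g : Int) = (t.length : Int) - (s.length : Int) := by omega
  rw [this]; ring

-- A's value, uniformly: zc of the reverses plus the absolute length difference
lemma diffDigit_char (a b : Int) :
    diffDigit a b
      = zc (PySem.Int.toChars a).reverse (PySem.Int.toChars b).reverse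
        + ((((PySem.Int.toChars a).length : Int) - ((PySem.Int.toChars b).length : Int)).natAbs : Int) := by
  unfold diffDigit
  set sa := PySem.Int.toChars a with hsa
  set sb := PySem.Int.toChars b with hsb
  simp only []
  by_cases h : sa.length = sb.length
  · simp only [h, if_pos]
    rw [mismatch_eq_zc _ _ h, ← zc_reverse _ _ h]
    simp
  · rw [if_neg h]
    rcases Nat.lt_or_ge sb.length sa.length with hlt | hge
    · rw [if_pos (by omega)]
      rw [main_left sa sb (toChars_no_star a) hlt]
      have : (((sa.length : Int) - (sb.length : Int)).natAbs : Int)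
          = (sa.length : Int) - (sb.length : Int) := by omega
      rw [this]
    · have hlt : sa.length < sb.length := by omega
      rw [if_neg (by omega)]
      rw [main_right sa sb (toChars_no_star b) hlt]
      have : (((sa.length : Int) - (sb.length : Int)).natAbs : Int)
          = (sb.length : Int) - (sa.length : Int) := by omega
      rw [this]

/- ---------- B-side: tokens n is the tok-image of the reversed character string ---------- -/

-- character → token translation: '-' ↦ -1, a digit character ↦ its value
def tok (c : Char) : Int := if c = '-' then -1 else (c.toNat : Int) - 48

-- characters produced by str(int): the sign or an ASCII digit
def goodChar (c : Char) : Prop := c = '-' ∨ (48 ≤ c.toNat ∧ c.toNat ≤ 57)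

lemma digitChar_good (d : Nat) (h : d < 10) : goodChar (Nat.digitChar d) := by
  interval_cases d <;> (right; decide)

lemma toDigitsCore_good (f n : Nat) (acc : List Char) (h : ∀ c ∈ acc, goodChar c) :
    ∀ c ∈ Nat.toDigitsCore 10 f n acc, goodChar c := by
  induction f generalizing n acc with
  | zero => simpa [Nat.toDigitsCore] using h
  | succ f ih =>
    intro c hc
    have hacc : ∀ c ∈ Nat.digitChar (n % 10) :: acc, goodChar c := by
      intro c hc
      rcases List.mem_cons.mp hc with rfl | hc
      · exact digitChar_good _ (Nat.mod_lt _ (by omega))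
      · exact h c hc
    simp only [Nat.toDigitsCore] at hc
    split at hc
    · exact hacc c hc
    · exact ih (n / 10) _ hacc c hc

lemma toChars_good (n : Int) : ∀ c ∈ PySem.Int.toChars n, goodChar c := by
  intro c hc
  unfold PySem.Int.toChars at hc
  split at hc
  · rcases List.mem_cons.mp hc with rfl | hc
    · left; rfl
    · exact toDigitsCore_good _ _ [] (by simp) c hc
  · exact toDigitsCore_good _ _ [] (by simp) c hc

lemma tok_inj {c d : Char} (hc : goodChar c) (hd : goodChar d) (h : tok c = tok d) : c = d := by
  rcases hc with rfl | hc <;> rcases hd with rfl | hd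
  · rfl
  · exfalso
    have hne : d ≠ '-' := by intro he; subst he; revert hd; decide
    unfold tok at h
    rw [if_pos rfl, if_neg hne] at h
    simp only [Char.toNat] at h hd
    omega
  · exfalso
    have hne : c ≠ '-' := by intro he; subst he; revert hc; decide
    unfold tok at h
    rw [if_neg hne, if_pos rfl] at h
    simp only [Char.toNat] at h hc
    omega
  · have hnc : c ≠ '-' := by intro he; subst he; revert hc; decide
    have hnd : d ≠ '-' := by intro he; subst he; revert hd; decide
    simp only [tok, if_neg hnc, if_neg hnd, Char.toNat] at h hc hd
    exact Char.ext (UInt32.toNat_inj.mp (by omega))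

lemma tok_digitChar (d : Nat) (h : d < 10) : tok (Nat.digitChar d) = (d : Int) := by
  interval_cases d <;> decide

-- accumulator and fuel normalisation for Nat.toDigitsCore
lemma toDigitsCore_acc (f n : Nat) (acc : List Char) :
    Nat.toDigitsCore 10 f n acc = Nat.toDigitsCore 10 f n [] ++ acc := by
  induction f generalizing n acc with
  | zero => simp [Nat.toDigitsCore]
  | succ f ih =>
    simp only [Nat.toDigitsCore]
    split
    · simp
    · rw [ih (n / 10) (Nat.digitChar (n % 10) :: acc), ih (n / 10) [Nat.digitChar (n % 10)]]
      simp

lemma toDigitsCore_fuel (f g n : Nat) (hf : n < f) (hg : n < g) :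
    Nat.toDigitsCore 10 f n [] = Nat.toDigitsCore 10 g n [] := by
  induction f generalizing g n with
  | zero => omega
  | succ f ih =>
    cases g with
    | zero => omega
    | succ g =>
      simp only [Nat.toDigitsCore]
      split
      · rfl
      · have hn : 0 < n / 10 := Nat.pos_of_ne_zero (by assumption)
        have h1 : n / 10 < n := Nat.div_lt_self (by omega) (by omega)
        rw [toDigitsCore_acc f (n / 10), toDigitsCore_acc g (n / 10),
          ih g (n / 10) (by omega) (by omega)]

lemma toDigits_unfold (n : Nat) :
    Nat.toDigits 10 n
      = (if n / 10 = 0 then [] else Nat.toDigits 10 (n / 10)) ++ [Nat.digitChar (n % 10)] := by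
  show Nat.toDigitsCore 10 (n + 1) n [] = _
  simp only [Nat.toDigitsCore]
  split
  · simp_all
  · have hn : 0 < n / 10 := Nat.pos_of_ne_zero (by assumption)
    rw [toDigitsCore_acc n (n / 10)]
    have : Nat.toDigitsCore 10 n (n / 10) [] = Nat.toDigitsCore 10 (n / 10 + 1) (n / 10) [] :=
      toDigitsCore_fuel _ _ _ (Nat.div_lt_self (by omega) (by omega)) (by omega)
    simp [Nat.toDigits, *]

lemma natTokens_eq (m : Nat) : natTokens m = (Nat.toDigits 10 m).reverse.map tok := by
  induction m using Nat.strong_induction_on with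
  | _ m ih =>
    rw [natTokens, toDigits_unfold m]
    simp only [List.reverse_append, List.reverse_singleton, List.singleton_append, List.map_cons,
      tok_digitChar _ (Nat.mod_lt _ (by omega))]
    split
    · simp [*]
    · rw [ih (m / 10) (Nat.div_lt_self (Nat.pos_of_ne_zero (by omega)) (by omega))]

lemma tokens_eq (n : Int) : tokens n = (PySem.Int.toChars n).reverse.map tok := by
  unfold tokens PySem.Int.toChars
  split
  · have : n.toNat = 0 := by omega
    simp [natTokens_eq, tok]
  · have hab : n.natAbs = n.toNat := by omega
    simp [natTokens_eq, hab]

/- ---------- B-side: the counting loop over optional indices ---------- -/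

-- the conditional-count foldl is a countP
lemma foldl_count {α : Type} (p : α → Prop) [DecidablePred p] (l : List α) (c : Int) :
    l.foldl (fun acc x => if p x then acc + 1 else acc) c
      = c + ((l.countP (fun x => decide (p x)) : Nat) : Int) := by
  induction l generalizing c with
  | nil => simp
  | cons x xs ih =>
    by_cases hx : p x <;> simp [hx, ih, add_assoc] <;> ring

-- the optional-index mismatch count over range(max) = zc + (max − min)
lemma countP_opt (xs ys : List Char) :
    (((List.range (max xs.length ys.length)).countP
        (fun i => decide (¬ xs[i]? = ys[i]?)) : Nat) : Int)
      = zc xs ys + ((max xs.length ys.length : Int) - (min xs.length ys.length : Int)) := by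
  induction xs generalizing ys with
  | nil =>
    have hall : ∀ i ∈ List.range ys.length, decide (¬ ([] : List Char)[i]? = ys[i]?) = true := by
      intro i hi
      have hi' : i < ys.length := List.mem_range.mp hi
      simp [List.getElem?_eq_getElem hi']
    cases ys with
    | nil => simp [zc]
    | cons y ys =>
      have hm : max ([] : List Char).length (y :: ys).length = (y :: ys).length := by simp
      rw [hm, List.countP_eq_length.mpr hall]
      simp only [zc, List.zip_nil_left, List.map_nil, List.sum_nil, List.length_nil,
        List.length_cons, List.length_range]
      push_cast
      omega
  | cons x xs ih =>
    cases ys with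
    | nil =>
      have hall : ∀ i ∈ List.range (x :: xs).length,
          decide (¬ (x :: xs)[i]? = ([] : List Char)[i]?) = true := by
        intro i hi
        have hi' : i < (x :: xs).length := List.mem_range.mp hi
        simp [List.getElem?_eq_getElem hi']
      have hm : max (x :: xs).length ([] : List Char).length = (x :: xs).length := by simp
      rw [hm, List.countP_eq_length.mpr hall]
      simp only [zc, List.zip_nil_right, List.map_nil, List.sum_nil, List.length_nil,
        List.length_cons, List.length_range]
      push_cast
      omega
    | cons y ys =>
      have hmax : max (x :: xs).length (y :: ys).length = max xs.length ys.length + 1 := by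
        simp [Nat.succ_max_succ]
      rw [hmax, List.range_succ_eq_map, List.countP_cons, List.countP_map]
      have hzero : (fun i => decide (¬ (x :: xs)[i + 1]? = (y :: ys)[i + 1]?)) ∘ id
          = fun i => decide (¬ xs[i]? = ys[i]?) := by
        funext i; simp
      have hcomp : ((fun i => decide (¬ (x :: xs)[i]? = (y :: ys)[i]?)) ∘ (· + 1))
          = fun i => decide (¬ xs[i]? = ys[i]?) := by
        funext i; simp
      rw [hcomp]
      push_cast
      rw [ih ys]
      have hz : zc (x :: xs) (y :: ys) = (if x ≠ y then (1 : Int) else 0) + zc xs ys := by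
        simp [zc]
      rw [hz]
      have h0x : (x :: xs)[0]? = some x := rfl
      have h0y : (y :: ys)[0]? = some y := rfl
      rw [h0x, h0y]
      by_cases hxy : x = y
      · simp [hxy]
      · simp [hxy]
        omega

-- tok translation does not change which positions differ
lemma countP_tok (xs ys : List Char) (hx : ∀ c ∈ xs, goodChar c) (hy : ∀ c ∈ ys, goodChar c) :
    (fun i : Nat => decide (¬ (xs.map tok)[i]? = (ys.map tok)[i]?))
      = fun i : Nat => decide (¬ xs[i]? = ys[i]?) := by
  funext i
  simp only [List.getElem?_map, decide_eq_decide]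
  cases hxs : xs[i]? with
  | none => cases hys : ys[i]? <;> simp
  | some x =>
    cases hys : ys[i]? with
    | none => simp
    | some y =>
      simp only [Option.map_some, Option.some.injEq, not_iff_not]
      constructor
      · exact fun h => tok_inj (hx x (List.mem_of_getElem? hxs)) (hy y (List.mem_of_getElem? hys)) h
      · rintro rfl; rfl

-- B's value, uniformly: the same zc-plus-length-difference quantity
lemma diffDigit_alt_char (a b : Int) :
    diffDigit_alt a b
      = zc (PySem.Int.toChars a).reverse (PySem.Int.toChars b).reverse
        + ((((PySem.Int.toChars a).length : Int) - ((PySem.Int.toChars b).length : Int)).natAbs : Int) := by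
  unfold diffDigit_alt
  simp only [tokens_eq]
  set ra := (PySem.Int.toChars a).reverse with hra
  set rb := (PySem.Int.toChars b).reverse with hrb
  rw [foldl_count (fun i => ¬ (ra.map tok)[i]? = (rb.map tok)[i]?)]
  have hlen : max (ra.map tok).length (rb.map tok).length = max ra.length rb.length := by simp
  rw [hlen,
    countP_tok ra rb (fun c hc => toChars_good a c (List.mem_reverse.mp hc))
      (fun c hc => toChars_good b c (List.mem_reverse.mp hc)),
    countP_opt ra rb]
  have h1 : ra.length = (PySem.Int.toChars a).length := by simp [hra]
  have h2 : rb.length = (PySem.Int.toChars b).length := by simp [hrb]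
  rw [h1, h2]
  have : (((((PySem.Int.toChars a).length : Int)) - ((PySem.Int.toChars b).length : Int)).natAbs : Int)
      = ((max (PySem.Int.toChars a).length (PySem.Int.toChars b).length : Int)
        - (min (PySem.Int.toChars a).length (PySem.Int.toChars b).length : Int)) := by
    omega
  rw [this]
  ring

-- ===== VERDICT (by name: the statement is the Claim_ definition above) =====
theorem diffDigit_spec : Claim_equal_diffDigit := by
  intro a b _
  unfold Spec_diffDigit
  rw [diffDigit_char, diffDigit_alt_char]
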